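-- pv_equiv track=rewrite | github.com/lirmag/All-works | classwork 18.03.22/17_22.py | f
-- ===== SOURCE A (Python) =====
-- def f(x):
--     m = 0
--     s = 0
--     while x > 0:
--         d = x % 7
--         s += d
--         if d > m:
--             m = d
--         x = x // 7
--     return m,s
-- ===== SOURCE B (Python) =====
-- def f(x):
--     if x <= 0:
--         return (0, 0)
--     q, d = divmod(x, 7)
--     m, s = f(q)
--     return (d if d > m else m, s + d)
-- ===== Notes on version B (the rewrite author's own statement) =====
-- stated objective: alternative
-- what changed: A is an iterative while-loop that mutates x and carries running max/sum accumulators; B is a recursive decomposition with no loop and no mutable state: it recurses on the quotient obtained by divmod and combines the returned (max,sum) pair with the current digit bottom-up on the way back.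
import Mathlib
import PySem

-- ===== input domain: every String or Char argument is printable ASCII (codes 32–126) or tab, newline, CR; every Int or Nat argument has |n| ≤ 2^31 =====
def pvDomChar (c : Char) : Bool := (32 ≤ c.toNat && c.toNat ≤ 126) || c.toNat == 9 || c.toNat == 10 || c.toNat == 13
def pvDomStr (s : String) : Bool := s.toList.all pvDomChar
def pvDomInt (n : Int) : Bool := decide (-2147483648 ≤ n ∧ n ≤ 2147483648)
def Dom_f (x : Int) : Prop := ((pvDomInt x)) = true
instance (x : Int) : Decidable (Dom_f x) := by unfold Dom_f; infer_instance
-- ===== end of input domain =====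

-- B replaces A's iterative while-loop with running max/sum accumulators by a
-- recursive decomposition: recurse on x // 7 and combine the returned pair with
-- the current digit on the way back; objective: alternative, same cost.

-- ===== PORT A =====
-- the while-loop of A, on state (x, m, s)
def fLoop (x m s : Int) : Int × Int :=
  if _h : 0 < x then
    let d := PySem.Int.mod x 7
    fLoop (PySem.Int.floordiv x 7) (if d > m then d else m) (s + d)
  else (m, s)
termination_by x.toNat
decreasing_by
  rw [PySem.Int.floordiv_eq_ediv_of_pos (by norm_num)]
  omega

def f (x : Int) : Int × Int := fLoop x 0 0

-- ===== PORT B =====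
-- divmod(x, 7) is ported exactly as (floordiv x 7, mod x 7): for a nonzero
-- divisor Python's divmod is the pair of its floor division and modulus.
def f_alt (x : Int) : Int × Int :=
  if _h : x ≤ 0 then (0, 0)
  else
    let q := PySem.Int.floordiv x 7
    let d := PySem.Int.mod x 7
    let ms := f_alt q
    (if d > ms.1 then d else ms.1, ms.2 + d)
termination_by x.toNat
decreasing_by
  rw [PySem.Int.floordiv_eq_ediv_of_pos (by norm_num)]
  omega

-- ===== PRECONDITION & SPEC =====
def Spec_f (x : Int) (out : Int × Int) : Prop := out = f_alt x
instance (x : Int) (out : Int × Int) : Decidable (Spec_f x out) := by unfold Spec_f; infer_instance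

-- ===== CLAIM =====
def Claim_equal_f : Prop := ∀ (x : Int), Dom_f x → Spec_f x (f x)

-- ===== LEMMAS AND PROOFS =====
theorem f_alt_fst_nonneg (x : Int) : 0 ≤ (f_alt x).1 := by
  induction x using f_alt.induct with
  | case1 x h => rw [f_alt]; simp [h]
  | case2 x h q ih =>
      rw [f_alt]
      simp only [h, dif_neg, not_false_iff]
      have hd : 0 ≤ PySem.Int.mod x 7 := PySem.Int.mod_nonneg _ (by norm_num)
      split_ifs with hc
      · exact hd
      · exact ih

theorem fLoop_eq (x m s : Int) (hm : 0 ≤ m) :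
    fLoop x m s = (max m (f_alt x).1, s + (f_alt x).2) := by
  induction x using f_alt.induct generalizing m s with
  | case1 x h =>
      rw [fLoop, f_alt]
      have : ¬ 0 < x := by omega
      simp only [this, dif_neg, not_false_iff, h, dif_pos]
      exact Prod.ext (by simpa using (max_eq_left hm).symm) (by simp)
  | case2 x h q ih =>
      have hx : 0 < x := by omega
      rw [fLoop, f_alt]
      simp only [hx, dif_pos, h, dif_neg, not_false_iff]
      have hd : 0 ≤ PySem.Int.mod x 7 := PySem.Int.mod_nonneg _ (by norm_num)
      have ih' : ∀ m s : Int, 0 ≤ m →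
          fLoop (PySem.Int.floordiv x 7) m s
            = (max m (f_alt (PySem.Int.floordiv x 7)).1,
               s + (f_alt (PySem.Int.floordiv x 7)).2) := ih
      rw [ih' _ _ (by split_ifs <;> omega)]
      refine Prod.ext ?_ (by dsimp only; omega)
      dsimp only
      simp only [max_def]
      split_ifs <;> omega

-- ===== VERDICT =====
theorem f_spec : Claim_equal_f := by
  intro x _
  unfold Spec_f f
  rw [fLoop_eq x 0 0 le_rfl]
  exact Prod.ext (by simpa using max_eq_right (f_alt_fst_nonneg x)) (by simp)
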